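-- pv_equiv track=rewrite | github.com/aria-systems-group/sym_quant_reactive_synth | src/symbolic_graphs/graph_search_scripts/frankaworld_main.py | _get_all_box_combos
-- ===== SOURCE A (Python) =====
-- from itertools import product, combinations
-- from typing import Tuple, List, Dict, Union
--
-- def _get_all_box_combos(boxes_dict: dict, predicate_dict: dict) -> Dict[str, list]:
--     """
--     The franka world has the world configuration (on b# l#) embedded into it's state defination.
--     Also, we could have all n but 1 boxes grounded with that single box (not grounded) being currently manipulated.
--
--     Thus, a valid set of state labels be
--         1) all boxes grounded - (on b0 l0)(on b1 l1)...
--         2) all but 1 grounded - (on b0 l0)(~(on b1 l1))(on b2 l2)...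
--
--     Hence, we need to create enough Boolean variables to accomodate all these possible configurations.
--     """
--     parent_combo_list = {'nb': [],   # preds where all boxes are grounded ad gripper free
--                          'b': []     # preds where n-1 boxes are grounded
--                          }
--
--     # create all grounded configurations
--     all_preds = [val for _, val in boxes_dict.items()]
--     all_preds += [predicate_dict['gripper']]
--     all_combos = list(product(*all_preds, repeat=1))
--
--     # when all the boxes are grouded then the gripper predicate is set to free
--     parent_combo_list['nb'].extend(all_combos)
--
--
--     # create n-1 combos
--     num_of_boxes = len(boxes_dict)
--
--     if num_of_boxes - 1 == 1:
--         return parent_combo_list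
--
--     # create all possible n-1 combinations of all boxes thhat can be grounded
--     combos = combinations([*boxes_dict.keys()], num_of_boxes - 1)
--
--     # iterate through every possible combo
--     for combo in combos:
--         # iterate through the tuple of boxes and create their combos
--         box_loc_list = [boxes_dict[box] for box in combo]
--         parent_combo_list['b'].extend(list(product(*box_loc_list, repeat=1)))
--
--     return parent_combo_list
-- ===== SOURCE B (Python) =====
-- from itertools import product
--
-- def _get_all_box_combos(boxes_dict: dict, predicate_dict: dict):
--     """Prefix/suffix dynamic programming: the n-1 grounded combos are built by
--     precomputing cartesian products of every prefix and every suffix of the box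
--     location lists once, then pairing prefix[i] with suffix[i+1] for the box i
--     left un-grounded (last box first, matching combinations' ordering)."""
--     vals = list(boxes_dict.values())
--     n = len(vals)
--     result = {'nb': list(product(*vals, predicate_dict['gripper'])), 'b': []}
--     if n - 1 == 1:
--         return result
--
--     # prefix[i] = product of vals[:i]; suffix[i] = product of vals[i:]
--     cur = [()]
--     prefix = [cur]
--     for v in vals:
--         cur = [t + (x,) for t in cur for x in v]
--         prefix.append(cur)
--     cur = [()]
--     suffix = [cur]
--     for v in reversed(vals):
--         cur = [(x,) + t for x in v for t in cur]
--         suffix.insert(0, cur)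
--
--     b = result['b']
--     for i in range(n - 1, -1, -1):   # box i is the one left un-grounded
--         b.extend(p + s for p in prefix[i] for s in suffix[i + 1])
--     return result
-- ===== Notes on version B (the rewrite author's own statement) =====
-- stated objective: alternative
-- what changed: The n-1 branch no longer enumerates combinations(keys, n-1) and re-multiplies each subset from scratch: B precomputes cartesian-product tables of every prefix and every suffix of the box location lists once, then pairs prefix[i] with suffix[i+1] for each box i left un-grounded (last box first), sharing all partial products.
import Mathlib
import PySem

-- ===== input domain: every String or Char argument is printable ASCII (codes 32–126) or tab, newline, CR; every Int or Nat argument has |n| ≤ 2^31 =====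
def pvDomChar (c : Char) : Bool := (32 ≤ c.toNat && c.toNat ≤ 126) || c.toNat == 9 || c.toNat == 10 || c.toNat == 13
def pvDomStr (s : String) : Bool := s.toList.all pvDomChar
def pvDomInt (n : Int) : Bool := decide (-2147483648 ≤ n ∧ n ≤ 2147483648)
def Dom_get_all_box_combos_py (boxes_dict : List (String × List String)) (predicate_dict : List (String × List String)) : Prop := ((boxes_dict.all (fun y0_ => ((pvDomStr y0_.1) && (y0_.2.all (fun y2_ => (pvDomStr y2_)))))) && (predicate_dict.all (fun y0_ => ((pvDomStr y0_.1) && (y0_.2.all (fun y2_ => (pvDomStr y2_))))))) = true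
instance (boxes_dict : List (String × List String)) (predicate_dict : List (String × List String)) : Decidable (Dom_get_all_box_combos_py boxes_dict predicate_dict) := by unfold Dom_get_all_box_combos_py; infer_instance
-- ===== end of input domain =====

-- B builds the n-1 grounded combos by prefix/suffix product tables paired per excluded box,
-- instead of A's product over each (n-1)-combination of keys (alternative decomposition).

-- ===== PORT A =====
-- itertools.product(*lists): all tuples, leftmost factor varies slowest (shared by both Pythons)
def pvProduct {α : Type} (ls : List (List α)) : List (List α) :=
  ls.foldr (fun l acc => l.flatMap (fun x => acc.map (x :: ·))) [[]]

-- itertools.combinations(l, r) in itertools' order (lexicographic by index)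
def pvCombinations {α : Type} : List α → Nat → List (List α)
  | _, 0 => [[]]
  | [], _ + 1 => []
  | x :: xs, r + 1 => (pvCombinations xs r).map (x :: ·) ++ pvCombinations xs (r + 1)

def get_all_box_combos_py (boxes_dict : List (String × List String)) (predicate_dict : List (String × List String)) : List (String × List (List String)) :=
  let bd := PySem.Dict.ofList boxes_dict
  let pd := PySem.Dict.ofList predicate_dict
  -- all_preds = [val for _, val in boxes_dict.items()] + [predicate_dict['gripper']]
  let all_preds := bd.items.map (·.2) ++ [pd.getD "gripper" []]
  let all_combos := pvProduct all_preds
  let num_of_boxes := bd.size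
  if num_of_boxes - 1 == 1 then [("nb", all_combos), ("b", [])]
  else
    let combos := pvCombinations bd.keys (num_of_boxes - 1)
    let b := combos.foldl (fun b combo => b ++ pvProduct (combo.map (fun box => bd.getD box []))) []
    [("nb", all_combos), ("b", b)]

-- ===== PORT B =====
-- 'for v in vals: cur = [t + (x,) for t in cur for x in v]; prefix.append(cur)'
def pvPrefixLoop (cur : List (List String)) (vals : List (List String)) : List (List (List String)) :=
  match vals with
  | [] => []
  | v :: rest =>
    let cur' := cur.flatMap (fun t => v.map (fun x => t ++ [x]))
    cur' :: pvPrefixLoop cur' rest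

-- 'for v in reversed(vals): cur = [(x,) + t for x in v for t in cur]; suffix.insert(0, cur)'
def pvSuffixes (vals : List (List String)) : List (List (List String)) :=
  match vals with
  | [] => [[[]]]
  | v :: rest =>
    let ss := pvSuffixes rest
    (v.flatMap (fun x => (ss.headD []).map (x :: ·))) :: ss

def get_all_box_combos_py_alt (boxes_dict : List (String × List String)) (predicate_dict : List (String × List String)) : List (String × List (List String)) :=
  let bd := PySem.Dict.ofList boxes_dict
  let pd := PySem.Dict.ofList predicate_dict
  let vals := bd.values
  let n := vals.length
  let nb := pvProduct (vals ++ [pd.getD "gripper" []])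
  if n - 1 == 1 then [("nb", nb), ("b", [])]
  else
    let prefixes := [([] : List String)] :: pvPrefixLoop [[]] vals
    let suffixes := pvSuffixes vals
    let b := (List.range n).reverse.foldl
      (fun b i => b ++ (prefixes.getD i []).flatMap (fun p => (suffixes.getD (i + 1) []).map (p ++ ·))) []
    [("nb", nb), ("b", b)]

-- ===== PRECONDITION & SPEC =====
-- Pre_ excludes the inputs where Python A raises: empty boxes_dict (combinations(keys, -1) raises ValueError)
-- and predicate dicts without a 'gripper' key (KeyError).
def Pre_get_all_box_combos_py (boxes_dict : List (String × List String)) (predicate_dict : List (String × List String)) : Prop :=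
  boxes_dict ≠ [] ∧ (PySem.Dict.ofList predicate_dict).contains "gripper" = true
instance (boxes_dict : List (String × List String)) (predicate_dict : List (String × List String)) : Decidable (Pre_get_all_box_combos_py boxes_dict predicate_dict) := by unfold Pre_get_all_box_combos_py; infer_instance

def pvWitness_get_all_box_combos_py : (List (String × List String)) × (List (String × List String)) :=
  ([("b0", ["l0", "l1"]), ("b1", ["l0"]), ("b2", ["l1"])], [("gripper", ["free"])])

def Spec_get_all_box_combos_py (boxes_dict : List (String × List String)) (predicate_dict : List (String × List String)) (out : List (String × List (List String))) : Prop := out = get_all_box_combos_py_alt boxes_dict predicate_dict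
instance (boxes_dict : List (String × List String)) (predicate_dict : List (String × List String)) (out : List (String × List (List String))) : Decidable (Spec_get_all_box_combos_py boxes_dict predicate_dict out) := by unfold Spec_get_all_box_combos_py; infer_instance

-- ===== CLAIM =====
def Claim_equal_get_all_box_combos_py : Prop := ∀ (boxes_dict : List (String × List String)) (predicate_dict : List (String × List String)), Dom_get_all_box_combos_py boxes_dict predicate_dict → Pre_get_all_box_combos_py boxes_dict predicate_dict → Spec_get_all_box_combos_py boxes_dict predicate_dict (get_all_box_combos_py boxes_dict predicate_dict)

-- ===== LEMMAS AND PROOFS =====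

lemma pvCombinations_gt {α : Type} (l : List α) (r : Nat) (h : l.length < r) :
    pvCombinations l r = [] := by
  induction l generalizing r with
  | nil => cases r with
    | zero => omega
    | succ r => rfl
  | cons x xs ih =>
    cases r with
    | zero => omega
    | succ r =>
      simp only [pvCombinations]
      rw [ih r (by simpa using h), ih (r + 1) (by simp at h; omega)]
      rfl

lemma pvCombinations_self {α : Type} (l : List α) :
    pvCombinations l l.length = [l] := by
  induction l with
  | nil => rfl
  | cons x xs ih =>
    simp only [List.length_cons, pvCombinations, ih,
      pvCombinations_gt xs (xs.length + 1) (by omega)]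
    rfl

-- combinations(l, |l| - 1), in itertools' order, is "erase index i" for i = |l|-1 down to 0
lemma pvCombinations_pred {α : Type} (x : α) (xs : List α) :
    pvCombinations (x :: xs) xs.length =
      ((List.range (xs.length + 1)).reverse.map (fun i => (x :: xs).eraseIdx i)) := by
  induction xs generalizing x with
  | nil => rfl
  | cons y ys ih =>
    have hsplit : (List.range (ys.length + 1 + 1)).reverse
        = (List.range (ys.length + 1)).reverse.map (· + 1) ++ [0] := by
      rw [List.range_succ_eq_map]
      simp [List.reverse_cons, List.map_reverse]
    have h1 : pvCombinations (x :: y :: ys) (ys.length + 1)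
        = (pvCombinations (y :: ys) ys.length).map (x :: ·)
          ++ pvCombinations (y :: ys) (ys.length + 1) := rfl
    have h2 : pvCombinations (y :: ys) (ys.length + 1) = [y :: ys] :=
      pvCombinations_self (y :: ys)
    rw [List.length_cons, h1, ih y, h2, hsplit]
    simp [List.map_map, Function.comp_def, List.eraseIdx_cons_succ]

lemma keys_ofList_ne_nil {ν : Type} (ps : List (String × ν)) (h : ps ≠ []) :
    (PySem.Dict.ofList ps).keys ≠ [] := by
  have hk : (PySem.Dict.ofList ps).keys = PySem.Set.ofList (ps.map Prod.fst) := by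
    simp [PySem.Dict.ofList, PySem.Dict.update, PySem.Dict.keys_foldl_insert_key,
      PySem.Dict.keys_empty, PySem.Set.ofList_eq_foldl, PySem.Set.update]
  have hm : (ps.head h).1 ∈ PySem.Set.ofList (ps.map Prod.fst) := by
    rw [PySem.Set.mem_ofList]
    exact List.mem_map_of_mem (List.head_mem h)
  rw [hk]; intro hnil; rw [hnil] at hm; exact (List.not_mem_nil) hm

-- product of a concatenation = pairwise concatenation of the two products
lemma pvProduct_append {α : Type} (as bs : List (List α)) :
    pvProduct (as ++ bs)
      = (pvProduct as).flatMap (fun p => (pvProduct bs).map (p ++ ·)) := by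
  induction as with
  | nil => simp [pvProduct]
  | cons a as ih =>
    simp only [List.cons_append, pvProduct, List.foldr_cons] at ih ⊢
    rw [ih]
    simp [List.map_flatMap, List.flatMap_map, List.map_map, List.flatMap_assoc,
      Function.comp_def]

lemma pvProduct_singleton {α : Type} (v : List α) :
    pvProduct [v] = v.map ([·]) := by
  induction v with
  | nil => rfl
  | cons a t ih => simp_all [pvProduct]

lemma pvPrefixLoop_eq (as vals : List (List String)) :
    pvPrefixLoop (pvProduct as) vals
      = (List.range vals.length).map (fun i => pvProduct (as ++ vals.take (i + 1))) := by
  induction vals generalizing as with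
  | nil => rfl
  | cons v rest ih =>
    have hcur : (pvProduct as).flatMap (fun t => v.map (fun x => t ++ [x]))
        = pvProduct (as ++ [v]) := by
      rw [pvProduct_append, pvProduct_singleton]
      simp [List.map_map, Function.comp_def]
    simp only [pvPrefixLoop, hcur, ih (as ++ [v]), List.length_cons,
      List.range_succ_eq_map, List.map_cons, List.map_map]
    simp [Function.comp_def, List.append_assoc]

lemma pvSuffixes_eq (vals : List (List String)) :
    pvSuffixes vals
      = (List.range (vals.length + 1)).map (fun i => pvProduct (vals.drop i)) := by
  induction vals with
  | nil => rfl
  | cons v rest ih =>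
    have hhead : (pvSuffixes rest).headD [] = pvProduct rest := by
      rw [ih, List.range_succ_eq_map]; rfl
    simp only [pvSuffixes, ih, List.length_cons]
    simp [List.range_succ_eq_map, List.map_map, Function.comp_def, pvProduct,
      List.drop_succ_cons]

lemma prefixes_getD (vals : List (List String)) (i : Nat) (h : i ≤ vals.length) :
    ([([] : List String)] :: pvPrefixLoop [[]] vals).getD i [] = pvProduct (vals.take i) := by
  cases i with
  | zero => rfl
  | succ j =>
    have : pvPrefixLoop [[]] vals = pvPrefixLoop (pvProduct []) vals := rfl
    rw [List.getD_cons_succ, this, pvPrefixLoop_eq]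
    have hj : j < vals.length := by omega
    rw [List.getD_eq_getElem _ _ (by simpa using hj)]
    simp

lemma suffixes_getD (vals : List (List String)) (i : Nat) (h : i ≤ vals.length) :
    (pvSuffixes vals).getD i [] = pvProduct (vals.drop i) := by
  rw [pvSuffixes_eq, List.getD_eq_getElem _ _ (by simpa using Nat.lt_succ_of_le h)]
  simp

-- ===== VERDICT =====
theorem get_all_box_combos_py_spec : Claim_equal_get_all_box_combos_py := by
  intro boxes_dict predicate_dict _ hpre
  unfold Spec_get_all_box_combos_py get_all_box_combos_py get_all_box_combos_py_alt
  have hnodup : (PySem.Dict.ofList boxes_dict).keys.Nodup :=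
    PySem.Dict.nodup_keys_ofList boxes_dict
  have hvals : (PySem.Dict.ofList boxes_dict).values
      = (PySem.Dict.ofList boxes_dict).keys.map
          (fun k => (PySem.Dict.ofList boxes_dict).getD k []) :=
    PySem.Dict.values_eq_map_keys _ hnodup []
  have hsz : (PySem.Dict.ofList boxes_dict).size
      = (PySem.Dict.ofList boxes_dict).keys.length := by
    simp [PySem.Dict.size, PySem.Dict.keys]
  have hlen : (PySem.Dict.ofList boxes_dict).values.length
      = (PySem.Dict.ofList boxes_dict).keys.length := by
    simp [hvals]
  have hnb : (PySem.Dict.ofList boxes_dict).items.map (·.2)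
      = (PySem.Dict.ofList boxes_dict).values := rfl
  simp only [hsz, hlen, hnb]
  obtain ⟨x, xs, hk⟩ := List.exists_cons_of_ne_nil (keys_ofList_ne_nil boxes_dict hpre.1)
  rw [hk]
  split
  · rfl
  · have hb :
        (pvCombinations (x :: xs) ((x :: xs).length - 1)).foldl
            (fun b combo => b ++ pvProduct (combo.map (fun box => (PySem.Dict.ofList boxes_dict).getD box []))) []
        = (List.range (x :: xs).length).reverse.foldl
            (fun b i => b ++
              (([([] : List String)] :: pvPrefixLoop [[]] (PySem.Dict.ofList boxes_dict).values).getD i []).flatMap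
                (fun p => ((pvSuffixes (PySem.Dict.ofList boxes_dict).values).getD (i + 1) []).map (p ++ ·))) [] := by
      simp only [List.length_cons, Nat.add_sub_cancel, pvCombinations_pred]
      rw [PySem.List.foldl_append_eq_flatMap, PySem.List.foldl_append_eq_flatMap,
        List.flatMap_map]
      congr 1
      apply List.flatMap_congr
      intro i hi
      have hilt : i < (x :: xs).length := by
        have := List.mem_reverse.mp hi
        simpa [List.mem_range] using this
      have hlt' : i < (PySem.Dict.ofList boxes_dict).values.length := by
        rw [hlen, hk]; exact hilt
      rw [prefixes_getD _ _ (Nat.le_of_lt hlt'), suffixes_getD _ _ hlt',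
        ← pvProduct_append, ← List.eraseIdx_eq_take_drop_succ, hvals, hk,
        List.eraseIdx_map]
    rw [hb]
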